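-- pv_equiv track=rewrite | github.com/davichoar/invernadiero | gentelella/app/views/moduloSemilla.py | paginar
-- ===== SOURCE A (Python) =====
-- def paginar(numeroPagina, totalPaginas):
--     paginacion = ""
--     paginacion += "<button class=\"btn btn-primary\" type=\"button\" disabled>%s</button>" % (numeroPagina)
--     cantidadBloques = 1
--     bloquesIzquierda = 2
--     bloquesDerecha = 2
--     if totalPaginas - numeroPagina < bloquesDerecha:
--         bloquesIzquierda += bloquesDerecha - (totalPaginas - numeroPagina)
--     pagina = numeroPagina - 1
--     while pagina > 0 and cantidadBloques < bloquesIzquierda + 1: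
--         paginacion = "<button class=\"btn btn-default\" type=\"button\" onclick=\"location.href='?page=%s';\">%s</button>" % (pagina, pagina) + paginacion
--         pagina -= 1
--         cantidadBloques += 1
--     pagina = numeroPagina + 1
--     while pagina <= totalPaginas  and cantidadBloques < 5:
--         paginacion =  paginacion + "<button class=\"btn btn-default\" type=\"button\" onclick=\"location.href='?page=%s';\">%s</button>" % (pagina, pagina)
--         pagina += 1
--         cantidadBloques +=1
--     if numeroPagina > 1:
--         paginacion = "<button class=\"btn btn-default\" type=\"button\" onclick=\"location.href='?page=%s';\">Anterior</button>" % (numeroPagina - 1) + paginacion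
--     else:
--         paginacion = "<button class=\"btn btn-default\" type=\"button\" disabled>Anterior</button>" + paginacion
--     if numeroPagina < totalPaginas:
--         paginacion += "<button class=\"btn btn-default\" type=\"button\" onclick=\"location.href='?page=%s';\">Siguiente</button>" % (numeroPagina + 1)
--     else:
--         paginacion += "<button class=\"btn btn-default\" type=\"button\" disabled>Siguiente</button>"
--     paginacion = "<div class=\"btn-group\" style=\"float: right;\">" + paginacion + "</div>"
--     return paginacion
-- ===== SOURCE B (Python) =====
-- def paginar(numeroPagina, totalPaginas):
--     left = min(2 + max(0, 2 - (totalPaginas - numeroPagina)), max(0, numeroPagina - 1))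
--     right = max(0, min(totalPaginas - numeroPagina, 4 - left))
--     parts = []
--     if numeroPagina > 1:
--         parts.append("<button class=\"btn btn-default\" type=\"button\" onclick=\"location.href='?page=%s';\">Anterior</button>" % (numeroPagina - 1))
--     else:
--         parts.append("<button class=\"btn btn-default\" type=\"button\" disabled>Anterior</button>")
--     for p in range(numeroPagina - left, numeroPagina + right + 1):
--         if p == numeroPagina:
--             parts.append("<button class=\"btn btn-primary\" type=\"button\" disabled>%s</button>" % (p))
--         else:
--             parts.append("<button class=\"btn btn-default\" type=\"button\" onclick=\"location.href='?page=%s';\">%s</button>" % (p, p))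
--     if numeroPagina < totalPaginas:
--         parts.append("<button class=\"btn btn-default\" type=\"button\" onclick=\"location.href='?page=%s';\">Siguiente</button>" % (numeroPagina + 1))
--     else:
--         parts.append("<button class=\"btn btn-default\" type=\"button\" disabled>Siguiente</button>")
--     return "<div class=\"btn-group\" style=\"float: right;\">" + "".join(parts) + "</div>"
-- ===== Notes on version B (the rewrite author's own statement) =====
-- stated objective: simpler
-- what changed: B replaces A's two while loops that share a mutable block counter by arithmetic that computes the left/right window widths up front and a single for-loop over that page range, with the current page emitted as the disabled primary button inside the same pass.
import Mathlib
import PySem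

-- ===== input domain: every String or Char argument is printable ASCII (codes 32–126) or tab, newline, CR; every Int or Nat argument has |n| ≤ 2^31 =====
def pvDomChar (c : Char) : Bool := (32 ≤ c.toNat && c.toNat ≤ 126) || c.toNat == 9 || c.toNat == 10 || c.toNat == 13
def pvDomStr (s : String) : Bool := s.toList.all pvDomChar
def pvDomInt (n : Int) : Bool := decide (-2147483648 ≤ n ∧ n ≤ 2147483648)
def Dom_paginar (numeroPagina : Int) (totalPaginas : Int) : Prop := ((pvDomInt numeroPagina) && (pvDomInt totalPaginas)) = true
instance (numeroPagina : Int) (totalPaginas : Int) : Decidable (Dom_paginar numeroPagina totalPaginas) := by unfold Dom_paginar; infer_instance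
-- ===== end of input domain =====

-- B replaces A's two shared-counter while loops by a computed page window (left/right counts) and one
-- pass over that range — objective: simpler; same cost.

-- shared string constants (the button snippets both programs emit)
def pvBtnDef (p : Int) : String :=
  "<button class=\"btn btn-default\" type=\"button\" onclick=\"location.href='?page=" ++ PySem.Int.toStr p ++ "';\">" ++ PySem.Int.toStr p ++ "</button>"
def pvBtnPri (p : Int) : String :=
  "<button class=\"btn btn-primary\" type=\"button\" disabled>" ++ PySem.Int.toStr p ++ "</button>"
def pvPrevLink (p : Int) : String :=
  "<button class=\"btn btn-default\" type=\"button\" onclick=\"location.href='?page=" ++ PySem.Int.toStr p ++ "';\">Anterior</button>"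
def pvPrevDis : String := "<button class=\"btn btn-default\" type=\"button\" disabled>Anterior</button>"
def pvNextLink (p : Int) : String :=
  "<button class=\"btn btn-default\" type=\"button\" onclick=\"location.href='?page=" ++ PySem.Int.toStr p ++ "';\">Siguiente</button>"
def pvNextDis : String := "<button class=\"btn btn-default\" type=\"button\" disabled>Siguiente</button>"

-- ===== PORT A =====
-- A's first while: prepend page buttons while pagina > 0 and cantidadBloques < bloquesIzquierda + 1
-- (fuel = bloquesIzquierda + 1 - cantidadBloques, the bound the counter itself enforces, makes the
-- recursion structural; the loop exits on its own conditions before fuel runs out)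
def pvLoopIzq : Nat → String → Int → Int → Int → String × Int
  | 0, paginacion, _, cantidadBloques, _ => (paginacion, cantidadBloques)
  | fuel + 1, paginacion, pagina, cantidadBloques, bloquesIzquierda =>
    if pagina > 0 ∧ cantidadBloques < bloquesIzquierda + 1 then
      pvLoopIzq fuel (pvBtnDef pagina ++ paginacion) (pagina - 1) (cantidadBloques + 1)
        bloquesIzquierda
    else (paginacion, cantidadBloques)

-- A's second while: append page buttons while pagina <= totalPaginas and cantidadBloques < 5
def pvLoopDer : Nat → String → Int → Int → Int → String
  | 0, paginacion, _, _, _ => paginacion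
  | fuel + 1, paginacion, pagina, cantidadBloques, totalPaginas =>
    if pagina ≤ totalPaginas ∧ cantidadBloques < 5 then
      pvLoopDer fuel (paginacion ++ pvBtnDef pagina) (pagina + 1) (cantidadBloques + 1) totalPaginas
    else paginacion

def paginar (numeroPagina : Int) (totalPaginas : Int) : String :=
  let paginacion := pvBtnPri numeroPagina
  let bloquesIzquierda : Int :=
    if totalPaginas - numeroPagina < 2 then 2 + (2 - (totalPaginas - numeroPagina)) else 2
  let izq := pvLoopIzq (bloquesIzquierda + 1 - 1).toNat paginacion (numeroPagina - 1) 1 bloquesIzquierda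
  let paginacion := pvLoopDer (5 - izq.2).toNat izq.1 (numeroPagina + 1) izq.2 totalPaginas
  let paginacion :=
    (if numeroPagina > 1 then pvPrevLink (numeroPagina - 1) else pvPrevDis) ++ paginacion
  let paginacion :=
    paginacion ++ (if numeroPagina < totalPaginas then pvNextLink (numeroPagina + 1) else pvNextDis)
  "<div class=\"btn-group\" style=\"float: right;\">" ++ paginacion ++ "</div>"

-- ===== PORT B =====
def paginar_alt (numeroPagina : Int) (totalPaginas : Int) : String :=
  let left := min (2 + max 0 (2 - (totalPaginas - numeroPagina))) (max 0 (numeroPagina - 1))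
  let right := max 0 (min (totalPaginas - numeroPagina) (4 - left))
  let parts : List String :=
    [if numeroPagina > 1 then pvPrevLink (numeroPagina - 1) else pvPrevDis]
    ++ (PySem.List.pyRange (numeroPagina - left) (numeroPagina + right + 1) 1).map
        (fun p => if p = numeroPagina then pvBtnPri p else pvBtnDef p)
    ++ [if numeroPagina < totalPaginas then pvNextLink (numeroPagina + 1) else pvNextDis]
  "<div class=\"btn-group\" style=\"float: right;\">" ++ String.join parts ++ "</div>"

-- ===== PRECONDITION & SPEC =====
def Spec_paginar (numeroPagina : Int) (totalPaginas : Int) (out : String) : Prop := out = paginar_alt numeroPagina totalPaginas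
instance (numeroPagina : Int) (totalPaginas : Int) (out : String) : Decidable (Spec_paginar numeroPagina totalPaginas out) := by unfold Spec_paginar; infer_instance

-- ===== CLAIM (what is proved, stated in full; the proofs are below) =====
def Claim_equal_paginar : Prop := ∀ (numeroPagina : Int) (totalPaginas : Int), Dom_paginar numeroPagina totalPaginas → Spec_paginar numeroPagina totalPaginas (paginar numeroPagina totalPaginas)

-- ===== LEMMAS AND PROOFS =====

lemma pvFoldl_append (l : List String) (a b : String) :
    List.foldl (· ++ ·) (a ++ b) l = a ++ List.foldl (· ++ ·) b l := by
  induction l generalizing b with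
  | nil => rfl
  | cons h t ih => simpa [String.append_assoc] using ih (b ++ h)

lemma pvJoin_nil : String.join ([] : List String) = "" := rfl

lemma pvJoin_cons (s : String) (l : List String) :
    String.join (s :: l) = s ++ String.join l := by
  have h := pvFoldl_append l s ""
  rw [String.append_empty] at h
  show List.foldl (· ++ ·) ("" ++ s) l = s ++ List.foldl (· ++ ·) "" l
  rw [String.empty_append]
  exact h

lemma pvJoin_append (l1 l2 : List String) :
    String.join (l1 ++ l2) = String.join l1 ++ String.join l2 := by
  induction l1 with
  | nil => simp [pvJoin_nil, String.empty_append]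
  | cons h t ih => simp [pvJoin_cons, ih, String.append_assoc]

-- the row of default page buttons for pages a, a+1, ..., b-1
def pvRow (a b : Int) : String := String.join ((PySem.List.pyRange a b 1).map pvBtnDef)

lemma pvRow_nil (a b : Int) (h : b ≤ a) : pvRow a b = "" := by
  rw [pvRow, PySem.List.pyRange_one_eq_nil h, List.map_nil, pvJoin_nil]

lemma pvRow_cons (a b : Int) (h : a < b) : pvRow a b = pvBtnDef a ++ pvRow (a + 1) b := by
  rw [pvRow, PySem.List.pyRange_one_cons h, List.map_cons, pvJoin_cons, pvRow]

lemma pvRow_snoc (a b : Int) (h : a ≤ b) : pvRow a (b + 1) = pvRow a b ++ pvBtnDef b := by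
  rw [pvRow, PySem.List.pyRange_one_succ_right h, List.map_append, pvJoin_append, pvRow]
  simp [pvJoin_cons, pvJoin_nil, String.append_empty]

lemma pvLoopIzq_spec (n : Nat) : ∀ (fuel : Nat) (pag cb biz : Int) (acc : String),
    max 0 (min (biz + 1 - cb) pag) = (n : Int) → n ≤ fuel →
    pvLoopIzq fuel acc pag cb biz = (pvRow (pag - n + 1) (pag + 1) ++ acc, cb + n) := by
  induction n with
  | zero =>
    intro fuel pag cb biz acc h _
    have hrow : pvRow (pag + 1) (pag + 1) = "" := pvRow_nil (pag + 1) (pag + 1) le_rfl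
    cases fuel with
    | zero =>
      simp only [pvLoopIzq, Nat.cast_zero, sub_zero, add_zero]
      rw [hrow, String.empty_append]
    | succ f =>
      simp only [pvLoopIzq, Nat.cast_zero, sub_zero, add_zero]
      rw [if_neg (by omega), hrow, String.empty_append]
  | succ n ih =>
    intro fuel pag cb biz acc h hf
    cases fuel with
    | zero => omega
    | succ f =>
      simp only [pvLoopIzq]
      rw [if_pos (by push_cast at h; omega)]
      rw [ih f (pag - 1) (cb + 1) biz _ (by push_cast at h ⊢; omega) (by omega)]
      push_cast
      have e1 : pag - 1 - (n : Int) + 1 = pag - n := by ring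
      have e2 : pag - 1 + 1 = pag := by ring
      have e3 : pag - ((n : Int) + 1) + 1 = pag - n := by ring
      rw [e1, e2, e3, pvRow_snoc (pag - (n : Int)) pag (by omega), String.append_assoc]
      congr 1
      ring

lemma pvLoopDer_spec (n : Nat) : ∀ (fuel : Nat) (pag cb tp : Int) (acc : String),
    max 0 (min (tp + 1 - pag) (5 - cb)) = (n : Int) → n ≤ fuel →
    pvLoopDer fuel acc pag cb tp = acc ++ pvRow pag (pag + n) := by
  induction n with
  | zero =>
    intro fuel pag cb tp acc h _
    have hrow : pvRow pag pag = "" := pvRow_nil pag pag le_rfl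
    cases fuel with
    | zero =>
      simp only [pvLoopDer, Nat.cast_zero, add_zero]
      rw [hrow, String.append_empty]
    | succ f =>
      simp only [pvLoopDer, Nat.cast_zero, add_zero]
      rw [if_neg (by omega), hrow, String.append_empty]
  | succ n ih =>
    intro fuel pag cb tp acc h hf
    cases fuel with
    | zero => omega
    | succ f =>
      simp only [pvLoopDer]
      rw [if_pos (by push_cast at h; omega)]
      rw [ih f (pag + 1) (cb + 1) tp _ (by push_cast at h ⊢; omega) (by omega)]
      push_cast
      have e1 : pag + ((n : Int) + 1) = pag + 1 + n := by ring
      rw [e1, pvRow_cons pag (pag + 1 + n) (by omega), String.append_assoc]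

-- ===== VERDICT (by name: the statement is the Claim_ definition above) =====
theorem paginar_spec : Claim_equal_paginar := by
  intro np tp _
  show paginar np tp = paginar_alt np tp
  obtain ⟨nL, hnL⟩ : ∃ n : Nat, min (2 + max 0 (2 - (tp - np))) (max 0 (np - 1)) = (n : Int) :=
    ⟨(min (2 + max 0 (2 - (tp - np))) (max 0 (np - 1))).toNat, by omega⟩
  obtain ⟨nR, hnR⟩ : ∃ n : Nat, max 0 (min (tp - np) (4 - (nL : Int))) = (n : Int) :=
    ⟨(max 0 (min (tp - np) (4 - (nL : Int)))).toNat, by omega⟩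
  have hbiz : (if tp - np < 2 then 2 + (2 - (tp - np)) else 2) = 2 + max 0 (2 - (tp - np)) := by
    split_ifs <;> omega
  have hA : paginar np tp =
      ("<div class=\"btn-group\" style=\"float: right;\">" ++
        (((if np > 1 then pvPrevLink (np - 1) else pvPrevDis) ++
          pvLoopDer
            (5 - (pvLoopIzq ((if tp - np < 2 then 2 + (2 - (tp - np)) else 2) + 1 - 1).toNat
              (pvBtnPri np) (np - 1) 1
              (if tp - np < 2 then 2 + (2 - (tp - np)) else 2)).2).toNat
            (pvLoopIzq ((if tp - np < 2 then 2 + (2 - (tp - np)) else 2) + 1 - 1).toNat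
              (pvBtnPri np) (np - 1) 1
              (if tp - np < 2 then 2 + (2 - (tp - np)) else 2)).1
            (np + 1)
            (pvLoopIzq ((if tp - np < 2 then 2 + (2 - (tp - np)) else 2) + 1 - 1).toNat
              (pvBtnPri np) (np - 1) 1
              (if tp - np < 2 then 2 + (2 - (tp - np)) else 2)).2 tp) ++
          (if np < tp then pvNextLink (np + 1) else pvNextDis))) ++ "</div>" := rfl
  have hB : paginar_alt np tp =
      ("<div class=\"btn-group\" style=\"float: right;\">" ++
        String.join
          ([if np > 1 then pvPrevLink (np - 1) else pvPrevDis] ++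
            (PySem.List.pyRange
              (np - min (2 + max 0 (2 - (tp - np))) (max 0 (np - 1)))
              (np + max 0 (min (tp - np)
                (4 - min (2 + max 0 (2 - (tp - np))) (max 0 (np - 1)))) + 1) 1).map
              (fun p => if p = np then pvBtnPri p else pvBtnDef p) ++
            [if np < tp then pvNextLink (np + 1) else pvNextDis])) ++ "</div>" := rfl
  rw [hA, hB, hbiz, hnL, hnR]
  have hizq := pvLoopIzq_spec nL ((2 + max 0 (2 - (tp - np)) + 1 - 1).toNat) (np - 1) 1
    (2 + max 0 (2 - (tp - np))) (pvBtnPri np) (by omega) (by omega)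
  simp only [hizq]
  rw [pvLoopDer_spec nR ((5 - (1 + (nL : Int))).toNat) (np + 1) (1 + (nL : Int)) tp _
    (by omega) (by omega)]
  have e1 : np - 1 - (nL : Int) + 1 = np - (nL : Int) := by ring
  have e2 : np - 1 + 1 = np := by ring
  have e3 : np + 1 + (nR : Int) = np + (nR : Int) + 1 := by ring
  rw [e1, e2, e3]
  rw [PySem.List.pyRange_one_append (np - (nL : Int)) np (np + (nR : Int) + 1)
        (by omega) (by omega),
      PySem.List.pyRange_one_cons (show np < np + (nR : Int) + 1 by omega)]
  have h1 : (PySem.List.pyRange (np - (nL : Int)) np 1).map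
        (fun p => if p = np then pvBtnPri p else pvBtnDef p)
      = (PySem.List.pyRange (np - (nL : Int)) np 1).map pvBtnDef := by
    apply List.map_congr_left
    intro p hp
    rw [PySem.List.mem_pyRange_one] at hp
    rw [if_neg (by omega)]
  have h2 : (PySem.List.pyRange (np + 1) (np + (nR : Int) + 1) 1).map
        (fun p => if p = np then pvBtnPri p else pvBtnDef p)
      = (PySem.List.pyRange (np + 1) (np + (nR : Int) + 1) 1).map pvBtnDef := by
    apply List.map_congr_left
    intro p hp
    rw [PySem.List.mem_pyRange_one] at hp
    rw [if_neg (by omega)]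
  rw [List.map_append, List.map_cons, h1, h2, if_pos rfl]
  simp only [List.cons_append, List.nil_append, List.append_assoc,
    pvJoin_append, pvJoin_cons, pvJoin_nil, pvRow]
  simp [String.append_assoc, String.append_empty]
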